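-- pv_equiv track=rewrite | github.com/thehalleyyoung/deppy | tests/test_equivalence/test_hard_eq_pairs.py | eq28b
-- ===== SOURCE A (Python) =====
-- def eq28b(s, pattern):
--     """NFA simulation."""
--     # Parse pattern into tokens
--     tokens = []
--     i = 0
--     while i < len(pattern):
--         if i + 1 < len(pattern) and pattern[i + 1] == '*':
--             tokens.append((pattern[i], True))  # (char, is_star)
--             i += 2
--         else:
--             tokens.append((pattern[i], False))
--             i += 1
--
--     n = len(tokens)
--     # States 0..n where state i means "about to match tokens[i]"
--     # State n = accept
--
--     def _epsilon_closure(states):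
--         """Add states reachable via star tokens (can skip them)."""
--         result = set(states)
--         changed = True
--         while changed:
--             changed = False
--             for st in list(result):
--                 if st < n and tokens[st][1]:  # star token, can skip
--                     if st + 1 not in result:
--                         result.add(st + 1)
--                         changed = True
--         return result
--
--     current = _epsilon_closure({0})
--     for ch in s:
--         next_states = set()
--         for st in current:
--             if st < n:
--                 tok_ch, is_star = tokens[st]
--                 if tok_ch == '.' or tok_ch == ch:
--                     if is_star:
--                         next_states.add(st)      # stay (more matches)
--                         next_states.add(st + 1)   # move on
--                     else:
--                         next_states.add(st + 1)
--         current = _epsilon_closure(next_states)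
--     return n in current
-- ===== SOURCE B (Python) =====
-- def eq28b(s, pattern):
--     """Boolean DP over (string position, token position): dp[j] says whether
--     tokens[j:] matches the current suffix of s; rows are filled right-to-left
--     over s.  No NFA state sets, no epsilon-closure fixpoint."""
--     toks = []
--     for c in pattern:
--         if c == '*' and toks and not toks[-1][1]:
--             toks[-1] = (toks[-1][0], True)
--         else:
--             toks.append((c, False))
--     n = len(toks)
--     # base row: empty suffix of s
--     dp = [False] * (n + 1)
--     dp[n] = True
--     for j in range(n - 1, -1, -1):
--         dp[j] = toks[j][1] and dp[j + 1]
--     # one row per character, right to left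
--     for i in range(len(s) - 1, -1, -1):
--         if True not in dp:
--             return False  # an all-False row is a fixed point: no suffix can match
--         ndp = [False] * (n + 1)
--         for j in range(n - 1, -1, -1):
--             c, star = toks[j]
--             m = c == '.' or c == s[i]
--             if star:
--                 ndp[j] = ndp[j + 1] or (m and dp[j])
--             else:
--                 ndp[j] = m and dp[j + 1]
--         dp = ndp
--     return dp[0]
-- ===== Notes on version B (the rewrite author's own statement) =====
-- stated objective: alternative
-- what changed: A simulates the NFA forward with sets of states and a while-changed epsilon-closure fixpoint per character; B is the textbook boolean dynamic program over (string position, token position), filling one row of n+1 booleans per character right-to-left (with an early exit once a row is all-False), no state sets and no closure computation.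
import Mathlib
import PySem

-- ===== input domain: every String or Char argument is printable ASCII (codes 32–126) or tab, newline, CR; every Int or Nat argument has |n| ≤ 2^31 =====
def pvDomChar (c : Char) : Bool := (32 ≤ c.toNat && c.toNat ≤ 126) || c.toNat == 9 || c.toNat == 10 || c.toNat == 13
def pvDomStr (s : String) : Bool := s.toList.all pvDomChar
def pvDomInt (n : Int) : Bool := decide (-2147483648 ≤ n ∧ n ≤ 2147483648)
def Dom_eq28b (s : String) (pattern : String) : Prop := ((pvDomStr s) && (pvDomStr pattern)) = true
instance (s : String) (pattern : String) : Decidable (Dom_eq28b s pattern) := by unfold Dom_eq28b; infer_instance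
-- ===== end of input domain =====

-- B replaces A's NFA simulation (state sets with a while-changed epsilon-closure fixpoint
-- per character) by a boolean dynamic program over (string position, token position):
-- one row of n+1 booleans per character, filled right-to-left (objective: alternative,
-- not claimed faster).

-- ===== PORT A =====
-- pattern parsing: A's index loop with one-token lookahead, as structural recursion
def pvParseA : List Char → List (Char × Bool)
  | [] => []
  | [c] => [(c, false)]
  | c :: c' :: rest =>
      if c' = '*' then (c, true) :: pvParseA rest
      else (c, false) :: pvParseA (c' :: rest)

-- body of the 'for st in list(result)' pass inside _epsilon_closure (state: result, changed)
def pvPassF (toks : List (Char × Bool)) (p : PySem.Set Nat × Bool) (st : Nat) :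
    PySem.Set Nat × Bool :=
  if st < toks.length && (toks.getD st (' ', false)).2 then
    if p.1.contains (st + 1) then p else (PySem.Set.add p.1 (st + 1), true)
  else p

-- one pass of the 'while changed' loop over the snapshot list(result)
def pvPassA (toks : List (Char × Bool)) (res : PySem.Set Nat) : PySem.Set Nat × Bool :=
  res.foldl (pvPassF toks) (res, false)

-- _epsilon_closure: iterate passes until changed is False; the fixpoint is reached in
-- at most length+1 productive passes, so fuel length+2 never runs out (proved below)
def pvCloseA (toks : List (Char × Bool)) : Nat → PySem.Set Nat → PySem.Set Nat
  | 0, res => res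
  | fuel + 1, res =>
      match pvPassA toks res with
      | (res', changed) => if changed then pvCloseA toks fuel res' else res'

-- body of the 'for st in current' loop building next_states
def pvNextF (toks : List (Char × Bool)) (ch : Char) (ns : PySem.Set Nat) (st : Nat) :
    PySem.Set Nat :=
  if st < toks.length then
    let tk := toks.getD st (' ', false)
    if tk.1 = '.' || tk.1 = ch then
      if tk.2 then PySem.Set.add (PySem.Set.add ns st) (st + 1)
      else PySem.Set.add ns (st + 1)
    else ns
  else ns

def pvNextA (toks : List (Char × Bool)) (ch : Char) (cur : PySem.Set Nat) : PySem.Set Nat :=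
  cur.foldl (pvNextF toks ch) PySem.Set.empty

def eq28b (s : String) (pattern : String) : Bool :=
  let toks := pvParseA pattern.toList
  let n := toks.length
  (s.toList.foldl (fun cur ch => pvCloseA toks (n + 2) (pvNextA toks ch cur))
      (pvCloseA toks (n + 2) (PySem.Set.ofList [0]))).contains n

-- ===== PORT B =====
-- '*' stars the previous (not yet starred) token, otherwise the char is a new token
def pvTokStep (toks : List (Char × Bool)) (c : Char) : List (Char × Bool) :=
  match toks.getLast? with
  | some (c0, false) =>
      if c = '*' then toks.dropLast ++ [(c0, true)] else toks ++ [(c, false)]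
  | _ => toks ++ [(c, false)]

-- base row: dp[j] for the empty suffix of s, filled from j = n-1 down to 0
-- (the j-loop runs right-to-left, i.e. structurally over the token suffix)
def pvRowB : List (Char × Bool) → List Bool
  | [] => [true]
  | (_, star) :: rest => (star && (pvRowB rest).headD false) :: pvRowB rest

-- one character step: from row dp (suffix starting after ch) build row ndp;
-- ndp[j] needs ndp[j+1], dp[j], dp[j+1], so the j-loop again runs right-to-left
def pvStepB (ch : Char) : List (Char × Bool) → List Bool → List Bool
  | [], _ => [false]                     -- ndp[n] = False
  | (c, star) :: rest, d :: ds =>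
      (if star then (pvStepB ch rest ds).headD false ||
          ((decide (c = '.') || decide (c = ch)) && d)
       else (decide (c = '.') || decide (c = ch)) && ds.headD false) :: pvStepB ch rest ds
  | _ :: _, [] => [false]                -- unreachable: dp always has length n+1

-- the i-loop, right-to-left over s (structurally over the char-list suffix);
-- 'if True not in dp: return False' becomes the none-result threaded through
def pvLoopB (toks : List (Char × Bool)) : List Char → Option (List Bool)
  | [] => some (pvRowB toks)
  | ch :: rest =>
      match pvLoopB toks rest with
      | none => none
      | some dp => if dp.contains true then some (pvStepB ch toks dp) else none

def eq28b_alt (s : String) (pattern : String) : Bool :=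
  let toks := pattern.toList.foldl pvTokStep []
  match pvLoopB toks s.toList with
  | none => false
  | some dp => dp.headD false

-- ===== PRECONDITION & SPEC =====
def Spec_eq28b (s : String) (pattern : String) (out : Bool) : Prop := out = eq28b_alt s pattern
instance (s : String) (pattern : String) (out : Bool) : Decidable (Spec_eq28b s pattern out) := by unfold Spec_eq28b; infer_instance

-- ===== CLAIM (what is proved, stated in full; the proofs are below) =====
def Claim_equal_eq28b : Prop := ∀ (s : String) (pattern : String), Dom_eq28b s pattern → Spec_eq28b s pattern (eq28b s pattern)

-- ===== LEMMAS AND PROOFS =====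

-- the reference matcher: does the token list match the char list?
def pvMatchF : List (Char × Bool) → List Char → Bool
  | [], [] => true
  | [], _ :: _ => false
  | (_, false) :: _, [] => false
  | (c, false) :: ts, x :: xs => (decide (c = '.') || decide (c = x)) && pvMatchF ts xs
  | (_, true) :: ts, [] => pvMatchF ts []
  | (c, true) :: ts, x :: xs =>
      pvMatchF ts (x :: xs) || ((decide (c = '.') || decide (c = x)) && pvMatchF ((c, true) :: ts) xs)
  termination_by ts cs => (cs.length, ts.length)

-- token j exists and is starred
def pvStar (toks : List (Char × Bool)) (j : Nat) : Bool := (toks.getD j (' ', false)).2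

-- every token in [a, b) is starred
def pvAllStar (toks : List (Char × Bool)) (a b : Nat) : Prop :=
  ∀ k, a ≤ k → k < b → pvStar toks k = true

-- k is epsilon-reachable from some state of S
def pvMemCl (toks : List (Char × Bool)) (S : List Nat) (k : Nat) : Prop :=
  ∃ st ∈ S, st ≤ k ∧ pvAllStar toks st k

lemma pvStar_lt {toks : List (Char × Bool)} {j : Nat} (h : pvStar toks j = true) :
    j < toks.length := by
  by_contra hc
  rw [not_lt] at hc
  unfold pvStar at h
  rw [List.getD_eq_getElem?_getD, List.getElem?_eq_none (by omega)] at h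
  simp at h

lemma pvGetD {toks : List (Char × Bool)} {j : Nat} (h : j < toks.length) :
    toks.getD j (' ', false) = toks[j] := by
  rw [List.getD_eq_getElem?_getD, List.getElem?_eq_getElem h]
  rfl

lemma pvStar_get {toks : List (Char × Bool)} {j : Nat} (h : j < toks.length) :
    pvStar toks j = toks[j].2 := by
  unfold pvStar
  rw [pvGetD h]

lemma pvNodup_length_le {S : List Nat} {n : Nat} (hnd : S.Nodup) (hb : ∀ j ∈ S, j ≤ n) :
    S.length ≤ n + 1 := by
  calc S.length = S.toFinset.card := (List.toFinset_card_of_nodup hnd).symm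
    _ ≤ (List.range (n + 1)).toFinset.card := by
        apply Finset.card_le_card
        intro x hx
        simp only [List.mem_toFinset, List.mem_range] at *
        exact Nat.lt_succ_of_le (hb x hx)
    _ ≤ (List.range (n + 1)).length := (List.range (n + 1)).toFinset_card_le
    _ = n + 1 := List.length_range

-- ---------- A-side pass lemmas ----------

lemma pvPassF_skip {toks : List (Char × Bool)} {st : Nat} (h : pvStar toks st = false)
    (p : PySem.Set Nat × Bool) : pvPassF toks p st = p := by
  unfold pvStar at h
  simp only [List.getD_eq_getElem?_getD] at h
  unfold pvPassF
  rw [if_neg (by simp [h])]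

lemma pvPassF_keep {toks : List (Char × Bool)} {st : Nat} (h : pvStar toks st = true)
    {p : PySem.Set Nat × Bool} (hc : (st + 1) ∈ p.1) : pvPassF toks p st = p := by
  have hlt := pvStar_lt h
  unfold pvStar at h
  rw [List.getD_eq_getElem?_getD, List.getElem?_eq_getElem hlt] at h
  simp only [Option.getD_some] at h
  unfold pvPassF
  rw [if_pos (by simp [h, hlt]), if_pos (by simp [hc])]

lemma pvPassF_add {toks : List (Char × Bool)} {st : Nat} (h : pvStar toks st = true)
    {p : PySem.Set Nat × Bool} (hc : (st + 1) ∉ p.1) :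
    pvPassF toks p st = (PySem.Set.add p.1 (st + 1), true) := by
  have hlt := pvStar_lt h
  unfold pvStar at h
  rw [List.getD_eq_getElem?_getD, List.getElem?_eq_getElem hlt] at h
  simp only [Option.getD_some] at h
  unfold pvPassF
  rw [if_pos (by simp [h, hlt]), if_neg (by simp [hc])]

lemma pvPassGo_mem (toks : List (Char × Bool)) :
    ∀ (L : List Nat) (R : PySem.Set Nat) (ch : Bool) (k : Nat),
      k ∈ (L.foldl (pvPassF toks) (R, ch)).1 ↔
        k ∈ R ∨ ∃ st ∈ L, pvStar toks st = true ∧ k = st + 1 := by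
  intro L
  induction L with
  | nil => intro R ch k; simp
  | cons st L' ih =>
    intro R ch k
    simp only [List.foldl_cons]
    by_cases hs : pvStar toks st = true
    · by_cases hc : (st + 1) ∈ R
      · rw [pvPassF_keep hs (p := (R, ch)) hc, ih]
        constructor
        · rintro (h | ⟨x, hx, h1, h2⟩)
          · exact Or.inl h
          · exact Or.inr ⟨x, List.mem_cons_of_mem _ hx, h1, h2⟩
        · rintro (h | ⟨x, hx, h1, h2⟩)
          · exact Or.inl h
          · rcases List.mem_cons.1 hx with rfl | hx'
            · exact Or.inl (h2 ▸ hc)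
            · exact Or.inr ⟨x, hx', h1, h2⟩
      · rw [pvPassF_add hs (p := (R, ch)) hc, ih, PySem.Set.mem_add]
        constructor
        · rintro ((h | h) | ⟨x, hx, h1, h2⟩)
          · exact Or.inl h
          · exact Or.inr ⟨st, List.mem_cons_self .., hs, h⟩
          · exact Or.inr ⟨x, List.mem_cons_of_mem _ hx, h1, h2⟩
        · rintro (h | ⟨x, hx, h1, h2⟩)
          · exact Or.inl (Or.inl h)
          · rcases List.mem_cons.1 hx with rfl | hx'
            · exact Or.inl (Or.inr h2)
            · exact Or.inr ⟨x, hx', h1, h2⟩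
    · rw [pvPassF_skip (Bool.not_eq_true _ ▸ hs) (R, ch), ih]
      constructor
      · rintro (h | ⟨x, hx, h1, h2⟩)
        · exact Or.inl h
        · exact Or.inr ⟨x, List.mem_cons_of_mem _ hx, h1, h2⟩
      · rintro (h | ⟨x, hx, h1, h2⟩)
        · exact Or.inl h
        · rcases List.mem_cons.1 hx with rfl | hx'
          · exact absurd h1 hs
          · exact Or.inr ⟨x, hx', h1, h2⟩

lemma pvPassGo_flag (toks : List (Char × Bool)) :
    ∀ (L : List Nat) (R : PySem.Set Nat),
      (L.foldl (pvPassF toks) (R, true)).2 = true := by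
  intro L
  induction L with
  | nil => intro R; simp
  | cons st L' ih =>
    intro R
    simp only [List.foldl_cons]
    by_cases hs : pvStar toks st = true
    · by_cases hc : (st + 1) ∈ R
      · rw [pvPassF_keep hs (p := (R, true)) hc]; exact ih R
      · rw [pvPassF_add hs (p := (R, true)) hc]; exact ih _
    · rw [pvPassF_skip (Bool.not_eq_true _ ▸ hs) (R, true)]; exact ih R

lemma pvSet_add_len (R : PySem.Set Nat) (x : Nat) : R.length ≤ (PySem.Set.add R x).length := by
  unfold PySem.Set.add
  split
  · exact le_rfl
  · simp

lemma pvPassGo_len (toks : List (Char × Bool)) :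
    ∀ (L : List Nat) (R : PySem.Set Nat) (ch : Bool),
      R.length ≤ (L.foldl (pvPassF toks) (R, ch)).1.length := by
  intro L
  induction L with
  | nil => intro R ch; simp
  | cons st L' ih =>
    intro R ch
    simp only [List.foldl_cons]
    by_cases hs : pvStar toks st = true
    · by_cases hc : (st + 1) ∈ R
      · rw [pvPassF_keep hs (p := (R, ch)) hc]; exact ih R ch
      · rw [pvPassF_add hs (p := (R, ch)) hc]
        exact le_trans (pvSet_add_len R (st + 1)) (ih _ true)
    · rw [pvPassF_skip (Bool.not_eq_true _ ▸ hs) (R, ch)]; exact ih R ch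

lemma pvPassGo_unchanged (toks : List (Char × Bool)) :
    ∀ (L : List Nat) (R : PySem.Set Nat),
      (L.foldl (pvPassF toks) (R, false)).2 = false →
        (L.foldl (pvPassF toks) (R, false)).1 = R ∧
        ∀ st ∈ L, pvStar toks st = true → (st + 1) ∈ R := by
  intro L
  induction L with
  | nil => intro R _; exact ⟨rfl, by simp⟩
  | cons st L' ih =>
    intro R h
    simp only [List.foldl_cons] at h ⊢
    by_cases hs : pvStar toks st = true
    · by_cases hc : (st + 1) ∈ R
      · rw [pvPassF_keep hs (p := (R, false)) hc] at h ⊢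
        obtain ⟨h1, h2⟩ := ih R h
        refine ⟨h1, ?_⟩
        intro x hx hxs
        rcases List.mem_cons.1 hx with rfl | hx'
        · exact hc
        · exact h2 x hx' hxs
      · exfalso
        rw [pvPassF_add hs (p := (R, false)) hc, pvPassGo_flag] at h
        simp at h
    · rw [pvPassF_skip (Bool.not_eq_true _ ▸ hs) (R, false)] at h ⊢
      obtain ⟨h1, h2⟩ := ih R h
      refine ⟨h1, ?_⟩
      intro x hx hxs
      rcases List.mem_cons.1 hx with rfl | hx'
      · exact absurd hxs hs
      · exact h2 x hx' hxs

lemma pvPassGo_grow (toks : List (Char × Bool)) :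
    ∀ (L : List Nat) (R : PySem.Set Nat),
      (L.foldl (pvPassF toks) (R, false)).2 = true →
        R.length < (L.foldl (pvPassF toks) (R, false)).1.length := by
  intro L
  induction L with
  | nil => intro R h; simp at h
  | cons st L' ih =>
    intro R h
    simp only [List.foldl_cons] at h ⊢
    by_cases hs : pvStar toks st = true
    · by_cases hc : (st + 1) ∈ R
      · rw [pvPassF_keep hs (p := (R, false)) hc] at h ⊢; exact ih R h
      · rw [pvPassF_add hs (p := (R, false)) hc]
        have hlen : R.length < (PySem.Set.add R (st + 1)).length := by
          unfold PySem.Set.add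
          rw [if_neg (by intro hcon; exact hc (List.mem_of_elem_eq_true hcon))]
          simp
        exact lt_of_lt_of_le hlen (pvPassGo_len toks L' _ true)
    · rw [pvPassF_skip (Bool.not_eq_true _ ▸ hs) (R, false)] at h ⊢; exact ih R h

lemma pvPassGo_nodup (toks : List (Char × Bool)) :
    ∀ (L : List Nat) (R : PySem.Set Nat) (ch : Bool),
      R.Nodup → (L.foldl (pvPassF toks) (R, ch)).1.Nodup := by
  intro L
  induction L with
  | nil => intro R ch h; simpa using h
  | cons st L' ih =>
    intro R ch h
    simp only [List.foldl_cons]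
    by_cases hs : pvStar toks st = true
    · by_cases hc : (st + 1) ∈ R
      · rw [pvPassF_keep hs (p := (R, ch)) hc]; exact ih R ch h
      · rw [pvPassF_add hs (p := (R, ch)) hc]
        exact ih _ true (PySem.Set.nodup_add R (st + 1) h)
    · rw [pvPassF_skip (Bool.not_eq_true _ ▸ hs) (R, ch)]; exact ih R ch h

lemma pvMemCl_mono {toks : List (Char × Bool)} {S S' : List Nat} (hsub : ∀ x ∈ S, x ∈ S')
    {k : Nat} (h : pvMemCl toks S k) : pvMemCl toks S' k := by
  obtain ⟨st, h1, h2, h3⟩ := h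
  exact ⟨st, hsub st h1, h2, h3⟩

lemma pvMemCl_pass {toks : List (Char × Bool)} {S S' : List Nat}
    (hmem : ∀ k, k ∈ S' ↔ k ∈ S ∨ ∃ st ∈ S, pvStar toks st = true ∧ k = st + 1) (k : Nat) :
    pvMemCl toks S' k ↔ pvMemCl toks S k := by
  constructor
  · rintro ⟨st', h1, h2, h3⟩
    rcases (hmem st').1 h1 with h | ⟨st, hst, hstar, rfl⟩
    · exact ⟨st', h, h2, h3⟩
    · refine ⟨st, hst, by omega, ?_⟩
      intro j hj1 hj2
      rcases Nat.eq_or_lt_of_le hj1 with rfl | hlt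
      · exact hstar
      · exact h3 j (by omega) hj2
  · exact pvMemCl_mono (fun x hx => (hmem x).2 (Or.inl hx))

lemma pvMemCl_closed {toks : List (Char × Bool)} {S : List Nat}
    (hcl : ∀ st ∈ S, pvStar toks st = true → (st + 1) ∈ S) {k : Nat}
    (h : pvMemCl toks S k) : k ∈ S := by
  obtain ⟨st, h1, h2, h3⟩ := h
  obtain ⟨d, hd⟩ : ∃ d, st + d = k := ⟨k - st, by omega⟩
  clear h2
  induction d generalizing st with
  | zero => exact (show st = k by omega) ▸ h1
  | succ d ih =>
    have hstar : pvStar toks st = true := h3 st le_rfl (by omega)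
    exact ih (st + 1) (hcl st h1 hstar) (fun j hj1 hj2 => h3 j (by omega) hj2) (by omega)

lemma pvCloseA_spec (toks : List (Char × Bool)) :
    ∀ (fuel : Nat) (S : List Nat), S.Nodup → (∀ j ∈ S, j ≤ toks.length) →
      toks.length + 2 ≤ fuel + S.length →
      (pvCloseA toks fuel S).Nodup ∧ (∀ j ∈ pvCloseA toks fuel S, j ≤ toks.length) ∧
      (∀ k, k ∈ pvCloseA toks fuel S ↔ pvMemCl toks S k) := by
  intro fuel
  induction fuel with
  | zero =>
    intro S hnd hb hbud
    exact absurd (pvNodup_length_le hnd hb) (by omega)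
  | succ fuel ih =>
    intro S hnd hb hbud
    have hstep : pvCloseA toks (fuel + 1) S =
        if (S.foldl (pvPassF toks) (S, false)).2 then
          pvCloseA toks fuel (S.foldl (pvPassF toks) (S, false)).1
        else (S.foldl (pvPassF toks) (S, false)).1 := by
      show (match pvPassA toks S with
        | (res', changed) => if changed then pvCloseA toks fuel res' else res') = _
      unfold pvPassA
      rfl
    by_cases hch : (S.foldl (pvPassF toks) (S, false)).2 = true
    · rw [hstep, if_pos hch]
      have hmem := pvPassGo_mem toks S S false
      have hnd' := pvPassGo_nodup toks S S false hnd
      have hb' : ∀ j ∈ (S.foldl (pvPassF toks) (S, false)).1, j ≤ toks.length := by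
        intro j hj
        rcases (hmem j).1 hj with h | ⟨st, _, hstar, rfl⟩
        · exact hb j h
        · exact pvStar_lt hstar
      have hbud' : toks.length + 2 ≤ fuel + (S.foldl (pvPassF toks) (S, false)).1.length := by
        have := pvPassGo_grow toks S S hch
        omega
      obtain ⟨c1, c2, c3⟩ := ih _ hnd' hb' hbud'
      refine ⟨c1, c2, fun k => ?_⟩
      rw [c3 k]
      exact pvMemCl_pass hmem k
    · rw [Bool.not_eq_true] at hch
      rw [hstep, if_neg (by simp [hch])]
      obtain ⟨h1, h2⟩ := pvPassGo_unchanged toks S S hch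
      rw [h1]
      refine ⟨hnd, hb, fun k => ⟨fun hk => ⟨k, hk, le_rfl, fun j hj1 hj2 => by omega⟩,
        pvMemCl_closed h2⟩⟩

-- ---------- A-side next_states lemmas ----------

lemma pvNextF_big {toks : List (Char × Bool)} {ch : Char} {st : Nat}
    (h : ¬ st < toks.length) (ns : PySem.Set Nat) : pvNextF toks ch ns st = ns := by
  unfold pvNextF
  rw [if_neg h]

lemma pvNextF_nomatch {toks : List (Char × Bool)} {ch : Char} {st : Nat}
    (hlt : st < toks.length)
    (h : ¬((toks.getD st (' ', false)).1 = '.' ∨ (toks.getD st (' ', false)).1 = ch))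
    (ns : PySem.Set Nat) : pvNextF toks ch ns st = ns := by
  unfold pvNextF
  rw [if_pos hlt, if_neg]
  rw [Bool.or_eq_true, decide_eq_true_eq, decide_eq_true_eq]
  exact h

lemma pvNextF_match {toks : List (Char × Bool)} {ch : Char} {st : Nat}
    (hlt : st < toks.length)
    (h : (toks.getD st (' ', false)).1 = '.' ∨ (toks.getD st (' ', false)).1 = ch)
    (ns : PySem.Set Nat) :
    pvNextF toks ch ns st =
      if (toks.getD st (' ', false)).2 then PySem.Set.add (PySem.Set.add ns st) (st + 1)
      else PySem.Set.add ns (st + 1) := by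
  unfold pvNextF
  rw [if_pos hlt, if_pos]
  rw [Bool.or_eq_true, decide_eq_true_eq, decide_eq_true_eq]
  exact h

lemma pvNextA_mem (toks : List (Char × Bool)) (ch : Char) :
    ∀ (L : List Nat) (ns : PySem.Set Nat) (k : Nat),
      k ∈ L.foldl (pvNextF toks ch) ns ↔
        k ∈ ns ∨ ∃ st ∈ L, st < toks.length ∧
          ((toks.getD st (' ', false)).1 = '.' ∨ (toks.getD st (' ', false)).1 = ch) ∧
          (k = st + 1 ∨ (pvStar toks st = true ∧ k = st)) := by
  intro L
  induction L with
  | nil => intro ns k; simp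
  | cons st L' ih =>
    intro ns k
    simp only [List.foldl_cons]
    by_cases hlt : st < toks.length
    · by_cases hm : (toks.getD st (' ', false)).1 = '.' ∨ (toks.getD st (' ', false)).1 = ch
      · rw [pvNextF_match hlt hm ns, ih]
        by_cases hs : pvStar toks st = true
        · rw [if_pos (by unfold pvStar at hs; exact hs)]
          rw [PySem.Set.mem_add, PySem.Set.mem_add]
          constructor
          · rintro (((h | he) | he) | ⟨x, hx, h1, h2, h3⟩)
            · exact Or.inl h
            · exact Or.inr ⟨st, List.mem_cons_self .., hlt, hm, Or.inr ⟨hs, he⟩⟩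
            · exact Or.inr ⟨st, List.mem_cons_self .., hlt, hm, Or.inl he⟩
            · exact Or.inr ⟨x, List.mem_cons_of_mem _ hx, h1, h2, h3⟩
          · rintro (h | ⟨x, hx, h1, h2, h3⟩)
            · exact Or.inl (Or.inl (Or.inl h))
            · rcases List.mem_cons.1 hx with rfl | hx'
              · rcases h3 with he | ⟨-, he⟩
                · exact Or.inl (Or.inr he)
                · exact Or.inl (Or.inl (Or.inr he))
              · exact Or.inr ⟨x, hx', h1, h2, h3⟩
        · rw [if_neg (by unfold pvStar at hs; simpa using hs)]
          rw [PySem.Set.mem_add]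
          constructor
          · rintro ((h | he) | ⟨x, hx, h1, h2, h3⟩)
            · exact Or.inl h
            · exact Or.inr ⟨st, List.mem_cons_self .., hlt, hm, Or.inl he⟩
            · exact Or.inr ⟨x, List.mem_cons_of_mem _ hx, h1, h2, h3⟩
          · rintro (h | ⟨x, hx, h1, h2, h3⟩)
            · exact Or.inl (Or.inl h)
            · rcases List.mem_cons.1 hx with rfl | hx'
              · rcases h3 with he | ⟨hstar, he⟩
                · exact Or.inl (Or.inr he)
                · exact absurd hstar hs
              · exact Or.inr ⟨x, hx', h1, h2, h3⟩
      · rw [pvNextF_nomatch hlt hm ns, ih]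
        constructor
        · rintro (h | ⟨x, hx, h1, h2, h3⟩)
          · exact Or.inl h
          · exact Or.inr ⟨x, List.mem_cons_of_mem _ hx, h1, h2, h3⟩
        · rintro (h | ⟨x, hx, h1, h2, h3⟩)
          · exact Or.inl h
          · rcases List.mem_cons.1 hx with rfl | hx'
            · exact absurd h2 hm
            · exact Or.inr ⟨x, hx', h1, h2, h3⟩
    · rw [pvNextF_big hlt ns, ih]
      constructor
      · rintro (h | ⟨x, hx, h1, h2, h3⟩)
        · exact Or.inl h
        · exact Or.inr ⟨x, List.mem_cons_of_mem _ hx, h1, h2, h3⟩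
      · rintro (h | ⟨x, hx, h1, h2, h3⟩)
        · exact Or.inl h
        · rcases List.mem_cons.1 hx with rfl | hx'
          · exact absurd h1 hlt
          · exact Or.inr ⟨x, hx', h1, h2, h3⟩

lemma pvNextA_nodup (toks : List (Char × Bool)) (ch : Char) :
    ∀ (L : List Nat) (ns : PySem.Set Nat), ns.Nodup → (L.foldl (pvNextF toks ch) ns).Nodup := by
  intro L
  induction L with
  | nil => intro ns h; simpa using h
  | cons st L' ih =>
    intro ns h
    simp only [List.foldl_cons]
    by_cases hlt : st < toks.length
    · by_cases hm : (toks.getD st (' ', false)).1 = '.' ∨ (toks.getD st (' ', false)).1 = ch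
      · rw [pvNextF_match hlt hm ns]
        split
        · exact ih _ (PySem.Set.nodup_add _ _ (PySem.Set.nodup_add _ _ h))
        · exact ih _ (PySem.Set.nodup_add _ _ h)
      · rw [pvNextF_nomatch hlt hm ns]
        exact ih ns h
    · rw [pvNextF_big hlt ns]
      exact ih ns h

-- ---------- matcher lemmas ----------

lemma pvDropCons {toks : List (Char × Bool)} {j : Nat} (h : j < toks.length) :
    toks.drop j = toks[j] :: toks.drop (j + 1) :=
  List.drop_eq_getElem_cons h

lemma pvMatchF_nil_cons (c : Char) (b : Bool) (ts : List (Char × Bool)) :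
    pvMatchF ((c, b) :: ts) [] = (b && pvMatchF ts []) := by
  cases b <;> simp [pvMatchF]

lemma pvMatchF_skip {toks : List (Char × Bool)} {j : Nat} {cs : List Char}
    (hlt : j < toks.length) (hst : toks[j].2 = true)
    (h : pvMatchF (toks.drop (j + 1)) cs = true) :
    pvMatchF (toks.drop j) cs = true := by
  rw [pvDropCons hlt]
  rcases hget : toks[j] with ⟨c, b⟩
  rw [hget] at hst
  change b = true at hst
  subst hst
  cases cs with
  | nil => simpa [pvMatchF] using h
  | cons x xs => simp [pvMatchF, h]

-- skipping a whole chain of starred tokens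
lemma pvMatchF_chain {toks : List (Char × Bool)} :
    ∀ (d st : Nat) (cs : List Char), pvAllStar toks st (st + d) →
      pvMatchF (toks.drop (st + d)) cs = true → pvMatchF (toks.drop st) cs = true := by
  intro d
  induction d with
  | zero => intro st cs _ h; exact h
  | succ d ih =>
    intro st cs hall h
    have hst : pvStar toks st = true := hall st le_rfl (by omega)
    have hlt := pvStar_lt hst
    rw [pvStar_get hlt] at hst
    apply pvMatchF_skip hlt hst
    exact ih (st + 1) cs (fun k h1 h2 => hall k (by omega) (by omega))
      (by rwa [show st + 1 + d = st + (d + 1) by omega])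

lemma pvMatchF_empty {toks : List (Char × Bool)} :
    ∀ (d j : Nat), j + d = toks.length →
      (pvMatchF (toks.drop j) [] = true ↔ pvAllStar toks j toks.length) := by
  intro d
  induction d with
  | zero =>
    intro j hj
    rw [show j = toks.length by omega, List.drop_length]
    simp [pvMatchF, pvAllStar]
    intro k h1 h2
    omega
  | succ d ih =>
    intro j hj
    have hlt : j < toks.length := by omega
    rw [pvDropCons hlt]
    rcases hget : toks[j] with ⟨c, b⟩
    rw [pvMatchF_nil_cons]
    constructor
    · intro h
      rw [Bool.and_eq_true] at h
      intro k h1 h2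
      rcases Nat.eq_or_lt_of_le h1 with rfl | hlt'
      · rw [pvStar_get hlt, hget]; exact h.1
      · exact (ih (j + 1) (by omega)).1 h.2 k (by omega) h2
    · intro h
      have h1 : b = true := by
        have := h j le_rfl hlt
        rwa [pvStar_get hlt, hget] at this
      have h2 := (ih (j + 1) (by omega)).2 (fun k hk1 hk2 => h k (by omega) hk2)
      rw [h1, h2]
      rfl

-- reaching the accept state along starred tokens
lemma pvChain {toks : List (Char × Bool)} {S : List Nat}
    (hcl : ∀ j ∈ S, pvStar toks j = true → j + 1 ∈ S) :
    ∀ (d j : Nat), j ∈ S → pvAllStar toks j (j + d) → j + d ∈ S := by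
  intro d
  induction d with
  | zero => intro j h _; exact h
  | succ d ih =>
    intro j h hall
    have hst : pvStar toks j = true := hall j le_rfl (by omega)
    have := ih (j + 1) (hcl j h hst) (fun k h1 h2 => hall k (by omega) (by omega))
    rwa [show j + 1 + d = j + (d + 1) by omega] at this

-- membership in the next-states set, from the empty starting set
lemma pvN_mem (toks : List (Char × Bool)) (ch : Char) (S : List Nat) (k : Nat) :
    k ∈ pvNextA toks ch S ↔ ∃ st ∈ S, st < toks.length ∧
      ((toks.getD st (' ', false)).1 = '.' ∨ (toks.getD st (' ', false)).1 = ch) ∧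
      (k = st + 1 ∨ (pvStar toks st = true ∧ k = st)) := by
  unfold pvNextA
  rw [pvNextA_mem]
  simp [PySem.Set.empty]

-- backward direction of the one-character step
lemma pvStepBack (toks : List (Char × Bool)) (ch : Char) (rest : List Char) {S : List Nat}
    (hcl : ∀ j ∈ S, pvStar toks j = true → j + 1 ∈ S) :
    ∀ (d j : Nat), j + d = toks.length → j ∈ S →
      pvMatchF (toks.drop j) (ch :: rest) = true →
      ∃ k, pvMemCl toks (pvNextA toks ch S) k ∧ pvMatchF (toks.drop k) rest = true := by
  intro d
  induction d with
  | zero =>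
    intro j hj _ hm
    rw [show j = toks.length by omega, List.drop_length] at hm
    simp [pvMatchF] at hm
  | succ d ih =>
    intro j hj hjS hm
    have hlt : j < toks.length := by omega
    rw [pvDropCons hlt] at hm
    rcases hget : toks[j] with ⟨c, b⟩
    rw [hget] at hm
    have hgd : toks.getD j (' ', false) = (c, b) := by rw [pvGetD hlt, hget]
    cases b with
    | false =>
      simp only [pvMatchF, Bool.and_eq_true, Bool.or_eq_true, decide_eq_true_eq] at hm
      refine ⟨j + 1, ⟨j + 1, ?_, le_rfl, fun k h1 h2 => by omega⟩, hm.2⟩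
      rw [pvN_mem]
      exact ⟨j, hjS, hlt, by rw [hgd]; exact hm.1, Or.inl rfl⟩
    | true =>
      simp only [pvMatchF, Bool.or_eq_true, Bool.and_eq_true, decide_eq_true_eq] at hm
      rcases hm with hm | ⟨hmc, hm⟩
      · have hst : pvStar toks j = true := by rw [pvStar_get hlt, hget]
        exact ih (j + 1) (by omega) (hcl j hjS hst) hm
      · refine ⟨j, ⟨j, ?_, le_rfl, fun k h1 h2 => by omega⟩, ?_⟩
        · rw [pvN_mem]
          refine ⟨j, hjS, hlt, by rw [hgd]; exact hmc,
            Or.inr ⟨by rw [pvStar_get hlt, hget], rfl⟩⟩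
        · rwa [pvDropCons hlt, hget]

-- correctness of A's NFA run against the matcher
lemma pvRunA_spec (toks : List (Char × Bool)) :
    ∀ (cs : List Char) (S : List Nat), S.Nodup → (∀ j ∈ S, j ≤ toks.length) →
      (∀ j ∈ S, pvStar toks j = true → j + 1 ∈ S) →
      ((toks.length ∈ cs.foldl
          (fun cur ch => pvCloseA toks (toks.length + 2) (pvNextA toks ch cur)) S) ↔
        ∃ j ∈ S, pvMatchF (toks.drop j) cs = true) := by
  intro cs
  induction cs with
  | nil =>
    intro S hnd hb hcl
    simp only [List.foldl_nil]
    constructor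
    · intro h
      exact ⟨toks.length, h, by rw [List.drop_length]; simp [pvMatchF]⟩
    · rintro ⟨j, hj, hm⟩
      have hjle := hb j hj
      have hall := (pvMatchF_empty (toks.length - j) j (by omega)).1 hm
      have := pvChain hcl (toks.length - j) j hj
        (fun k h1 h2 => hall k h1 (by omega))
      rwa [show j + (toks.length - j) = toks.length by omega] at this
  | cons ch rest ih =>
    intro S hnd hb hcl
    simp only [List.foldl_cons]
    have hNnd : (pvNextA toks ch S).Nodup := by
      unfold pvNextA
      exact pvNextA_nodup toks ch S PySem.Set.empty List.nodup_nil
    have hNb : ∀ j ∈ pvNextA toks ch S, j ≤ toks.length := by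
      intro j hj
      rcases (pvN_mem toks ch S j).1 hj with ⟨st, -, h1, -, (rfl | ⟨-, rfl⟩)⟩ <;> omega
    obtain ⟨hCnd, hCb, hCmem⟩ :=
      pvCloseA_spec toks (toks.length + 2) (pvNextA toks ch S) hNnd hNb (by omega)
    have hCcl : ∀ j ∈ pvCloseA toks (toks.length + 2) (pvNextA toks ch S),
        pvStar toks j = true → j + 1 ∈ pvCloseA toks (toks.length + 2) (pvNextA toks ch S) := by
      intro j hj hst
      rw [hCmem] at hj ⊢
      obtain ⟨st, h1, h2, h3⟩ := hj
      refine ⟨st, h1, by omega, fun k hk1 hk2 => ?_⟩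
      rcases Nat.lt_or_ge k j with hk | hk
      · exact h3 k hk1 hk
      · rwa [show k = j by omega]
    rw [ih _ hCnd hCb hCcl]
    constructor
    · rintro ⟨k, hk, hm⟩
      rw [hCmem] at hk
      obtain ⟨st, hstN, hle, hall⟩ := hk
      have hmst : pvMatchF (toks.drop st) rest = true :=
        pvMatchF_chain (k - st) st rest
          (fun i h1 h2 => hall i h1 (by omega))
          (by rwa [show st + (k - st) = k by omega])
      rcases (pvN_mem toks ch S st).1 hstN with ⟨j, hjS, hjlt, hjm, hcase⟩
      refine ⟨j, hjS, ?_⟩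
      rcases hget : toks[j] with ⟨c, b⟩
      have hgd : toks.getD j (' ', false) = (c, b) := by rw [pvGetD hjlt, hget]
      rw [hgd] at hjm
      rw [pvDropCons hjlt, hget]
      rcases hcase with rfl | ⟨hst, rfl⟩
      · cases b with
        | false =>
          simp only [pvMatchF, Bool.and_eq_true, Bool.or_eq_true, decide_eq_true_eq]
          exact ⟨hjm, hmst⟩
        | true =>
          simp only [pvMatchF, Bool.or_eq_true, Bool.and_eq_true, decide_eq_true_eq]
          refine Or.inr ⟨hjm, ?_⟩
          have := pvMatchF_skip hjlt (by rw [hget]) hmst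
          rwa [pvDropCons hjlt, hget] at this
      · have hbt : b = true := by rw [pvStar_get hjlt, hget] at hst; exact hst
        subst hbt
        simp only [pvMatchF, Bool.or_eq_true, Bool.and_eq_true, decide_eq_true_eq]
        refine Or.inr ⟨hjm, ?_⟩
        rwa [pvDropCons hjlt, hget] at hmst
    · rintro ⟨j, hjS, hm⟩
      have hjle := hb j hjS
      obtain ⟨k, hkCl, hkm⟩ :=
        pvStepBack toks ch rest hcl (toks.length - j) j (by omega) hjS hm
      exact ⟨k, (hCmem k).2 hkCl, hkm⟩

-- ---------- B-side DP lemmas ----------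

lemma pvTailsHead (f : List (Char × Bool) → Bool) (l : List (Char × Bool)) :
    ((l.tails.map f).headD false) = f l := by
  cases l <;> simp [List.tails]

lemma pvRowB_spec : ∀ (toks : List (Char × Bool)),
    pvRowB toks = toks.tails.map (fun ts => pvMatchF ts []) := by
  intro toks
  induction toks with
  | nil => simp [pvRowB, List.tails, pvMatchF]
  | cons t rest ih =>
    rcases t with ⟨c, b⟩
    simp only [pvRowB, List.tails_cons, List.map_cons, ih]
    rw [pvTailsHead, pvMatchF_nil_cons]

lemma pvStepB_spec (ch : Char) : ∀ (toks : List (Char × Bool)) (cs : List Char),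
    pvStepB ch toks (toks.tails.map (fun ts => pvMatchF ts cs)) =
      toks.tails.map (fun ts => pvMatchF ts (ch :: cs)) := by
  intro toks
  induction toks with
  | nil => intro cs; simp [pvStepB, List.tails, pvMatchF]
  | cons t rest ih =>
    intro cs
    rcases t with ⟨c, b⟩
    simp only [List.tails_cons, List.map_cons, pvStepB, ih cs]
    rw [pvTailsHead, pvTailsHead]
    congr 1
    cases b with
    | false => simp [pvMatchF]
    | true => simp [pvMatchF]

-- an all-false row is preserved by one more character
lemma pvAllFalse (toks : List (Char × Bool)) (cs : List Char) (ch : Char)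
    (h : ∀ ts, ts <:+ toks → pvMatchF ts cs = false) :
    ∀ ts, ts <:+ toks → pvMatchF ts (ch :: cs) = false := by
  intro ts
  induction ts with
  | nil => intro _; simp [pvMatchF]
  | cons t rest ih =>
    intro hsuf
    have hrest : rest <:+ toks := (List.suffix_cons t rest).trans hsuf
    rcases t with ⟨c, b⟩
    cases b with
    | false => simp [pvMatchF, h rest hrest]
    | true => simp [pvMatchF, ih hrest, h ((c, true) :: rest) hsuf]

lemma pvLoopB_spec (toks : List (Char × Bool)) : ∀ (cs : List Char),
    pvLoopB toks cs = some (toks.tails.map (fun ts => pvMatchF ts cs)) ∨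
      (pvLoopB toks cs = none ∧ ∀ ts, ts <:+ toks → pvMatchF ts cs = false) := by
  intro cs
  induction cs with
  | nil => exact Or.inl (by rw [pvLoopB, pvRowB_spec])
  | cons ch rest ih =>
    have hred : pvLoopB toks (ch :: rest) =
        match pvLoopB toks rest with
        | none => none
        | some dp => if dp.contains true then some (pvStepB ch toks dp) else none := rfl
    rcases ih with ih | ⟨ih, hall⟩
    · rw [hred, ih]
      by_cases hc : (toks.tails.map (fun ts => pvMatchF ts rest)).contains true
      · refine Or.inl ?_
        show (if (toks.tails.map (fun ts => pvMatchF ts rest)).contains true then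
            some (pvStepB ch toks (toks.tails.map (fun ts => pvMatchF ts rest)))
          else none) = _
        rw [if_pos hc, pvStepB_spec]
      · refine Or.inr ⟨?_, ?_⟩
        · show (if (toks.tails.map (fun ts => pvMatchF ts rest)).contains true then
              some (pvStepB ch toks (toks.tails.map (fun ts => pvMatchF ts rest)))
            else none) = none
          rw [if_neg hc]
        · apply pvAllFalse
          intro ts hsuf
          by_contra hne
          rw [Bool.not_eq_false] at hne
          exact hc (List.contains_iff_mem.mpr
            (List.mem_map.mpr ⟨ts, (List.mem_tails ts toks).mpr hsuf, hne⟩))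
    · exact Or.inr ⟨by rw [hred, ih], pvAllFalse toks rest ch hall⟩

lemma eq28b_alt_eq (s pattern : String) :
    eq28b_alt s pattern = pvMatchF (pattern.toList.foldl pvTokStep []) s.toList := by
  show (match pvLoopB (pattern.toList.foldl pvTokStep []) s.toList with
    | none => false
    | some dp => dp.headD false) = _
  rcases pvLoopB_spec (pattern.toList.foldl pvTokStep []) s.toList with h | ⟨h, hall⟩
  · rw [h]
    exact pvTailsHead _ _
  · rw [h, (hall _ List.suffix_rfl)]

-- ---------- the two parses agree ----------

lemma pvTokStep_append {toks : List (Char × Bool)} {c : Char}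
    (h : ∀ c0, toks.getLast? = some (c0, false) → c ≠ '*') :
    pvTokStep toks c = toks ++ [(c, false)] := by
  unfold pvTokStep
  split
  · rename_i c0 heq
    rw [if_neg (h c0 heq)]
  · rfl

lemma pvParse_fold :
    ∀ (l : List Char) (acc : List (Char × Bool)),
      (∀ c0, acc.getLast? = some (c0, false) → l.head? ≠ some '*') →
      l.foldl pvTokStep acc = acc ++ pvParseA l := by
  intro l
  induction l using pvParseA.induct with
  | case1 =>
    intro acc h
    simp [pvParseA]
  | case2 c =>
    intro acc h
    have h1 : pvTokStep acc c = acc ++ [(c, false)] := by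
      apply pvTokStep_append
      intro c0 hc0 hc
      exact (h c0 hc0) (by rw [hc]; rfl)
    simp [h1, pvParseA]
  | case3 c rest ih =>
    intro acc h
    have h1 : pvTokStep acc c = acc ++ [(c, false)] := by
      apply pvTokStep_append
      intro c0 hc0 hc
      exact (h c0 hc0) (by rw [hc]; rfl)
    have h2 : pvTokStep (acc ++ [(c, false)]) '*' = acc ++ [(c, true)] := by
      unfold pvTokStep
      split
      · rename_i c0 heq
        rw [List.getLast?_concat] at heq
        have hc0 : c0 = c := by
          injection heq with heq'
          exact (congrArg Prod.fst heq').symm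
        rw [if_pos rfl, List.dropLast_concat, hc0]
      · rename_i hne
        exact absurd (List.getLast?_concat) (by intro hcon; exact (hne c (hcon ▸ rfl)).elim)
    rw [List.foldl_cons, h1, List.foldl_cons, h2,
      ih (acc ++ [(c, true)]) (by
        intro c0 hc0
        rw [List.getLast?_concat] at hc0
        injection hc0 with hc0'
        exact absurd (congrArg Prod.snd hc0') (by simp))]
    rw [show pvParseA (c :: '*' :: rest) =
        if ('*' : Char) = '*' then (c, true) :: pvParseA rest
        else (c, false) :: pvParseA ('*' :: rest) from rfl, if_pos rfl]
    simp
  | case4 c c' rest hne ih =>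
    intro acc h
    have h1 : pvTokStep acc c = acc ++ [(c, false)] := by
      apply pvTokStep_append
      intro c0 hc0 hc
      exact (h c0 hc0) (by rw [hc]; rfl)
    rw [List.foldl_cons, h1,
      ih (acc ++ [(c, false)]) (by
        intro c0 hc0 hcon
        apply hne
        simp only [List.head?_cons, Option.some.injEq] at hcon
        rw [hcon])]
    rw [show pvParseA (c :: c' :: rest) =
        if c' = '*' then (c, true) :: pvParseA rest
        else (c, false) :: pvParseA (c' :: rest) from rfl, if_neg hne]
    simp

lemma pvParse_eq (pattern : String) :
    pattern.toList.foldl pvTokStep [] = pvParseA pattern.toList :=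
  pvParse_fold pattern.toList [] (by simp)

-- ---------- A's port computes the matcher ----------

lemma eq28b_eq (s pattern : String) :
    eq28b s pattern = pvMatchF (pvParseA pattern.toList) s.toList := by
  show (s.toList.foldl
      (fun cur ch => pvCloseA (pvParseA pattern.toList) ((pvParseA pattern.toList).length + 2)
        (pvNextA (pvParseA pattern.toList) ch cur))
      (pvCloseA (pvParseA pattern.toList) ((pvParseA pattern.toList).length + 2)
        (PySem.Set.ofList [0]))).contains (pvParseA pattern.toList).length = _
  set toks := pvParseA pattern.toList with htoks
  have hS0 : PySem.Set.ofList [0] = ([0] : List Nat) := rfl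
  obtain ⟨hCnd, hCb, hCmem⟩ := pvCloseA_spec toks (toks.length + 2) (PySem.Set.ofList [0])
    (by rw [hS0]; simp) (by rw [hS0]; simp) (by rw [hS0]; simp)
  have hCcl : ∀ j ∈ pvCloseA toks (toks.length + 2) (PySem.Set.ofList [0]),
      pvStar toks j = true → j + 1 ∈ pvCloseA toks (toks.length + 2) (PySem.Set.ofList [0]) := by
    intro j hj hst
    rw [hCmem] at hj ⊢
    obtain ⟨st, h1, h2, h3⟩ := hj
    refine ⟨st, h1, by omega, fun k hk1 hk2 => ?_⟩
    rcases Nat.lt_or_ge k j with hk | hk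
    · exact h3 k hk1 hk
    · rwa [show k = j by omega]
  have hrun := pvRunA_spec toks s.toList _ hCnd hCb hCcl
  have hmem : (∃ j ∈ pvCloseA toks (toks.length + 2) (PySem.Set.ofList [0]),
      pvMatchF (toks.drop j) s.toList = true) ↔ pvMatchF toks s.toList = true := by
    constructor
    · rintro ⟨j, hj, hm⟩
      rw [hCmem] at hj
      obtain ⟨st, h1, h2, h3⟩ := hj
      rw [hS0] at h1
      simp only [List.mem_singleton] at h1
      subst h1
      have := pvMatchF_chain j 0 s.toList (by simpa using h3)
        (by simpa using hm)
      simpa using this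
    · intro hm
      refine ⟨0, ?_, by simpa using hm⟩
      rw [hCmem, hS0]
      exact ⟨0, by simp, le_rfl, fun k h1 h2 => by omega⟩
  by_cases hfin : pvMatchF toks s.toList = true
  · rw [hfin]
    exact List.contains_iff_mem.mpr (hrun.2 (hmem.2 hfin))
  · rw [Bool.not_eq_true] at hfin
    rw [hfin, ← Bool.not_eq_true]
    intro hc
    have hx := hmem.1 (hrun.1 (List.contains_iff_mem.mp hc))
    rw [hfin] at hx
    simp at hx

-- ===== VERDICT (by name: the statement is the Claim_ definition above) =====
theorem eq28b_spec : Claim_equal_eq28b := by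
  intro s pattern _
  unfold Spec_eq28b
  rw [eq28b_eq, eq28b_alt_eq, pvParse_eq]
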